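-- pv_equiv track=rewrite | github.com/pjbriggs/nebulizer | nebulizer/tools.py | handle_repository_spec
-- ===== SOURCE A (Python) =====
-- def handle_repository_spec(repo_spec):
--     """
--     Process an arbitrary repository specification
--
--     Given a repository specification as list of one of
--     more components, returns the toolshed URL, repository
--     owner, repository name and revision.
--
--     The specification can be any of the forms:
--
--     - ('https://toolshed.g2.bx.psu.edu/view/devteam/fastqc/e7b2202befea')
--     - ('https://toolshed.g2.bx.psu.edu/view/devteam/fastqc')
--     - ('devteam/fastqc/e7b2202befea',)
--     - ('devteam/fastqc',)
--     - ('toolshed.g2.bx.psu.edu','devteam','fastqc','e7b2202befea')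
--     - ('toolshed.g2.bx.psu.edu','devteam','fastqc')
--     - ('devteam','fastqc')
--     - ('devteam','fastqc','e7b2202befea')
--     - ('devteam','fastqc','3:e7b2202befea')
--
--     Revision is set to None if not found; toolshed is set
--     to the main Galaxy toolshed if not found.
--
--     The leading protocol (https://, http://) is removed
--     from the toolshed URL.
--
--     Returns the tuple of (TOOLSHED,OWNER,REPOSITORY,REVISION)
--     """
--     repository = list(repo_spec)
--     repo0 = repository[0].strip('/')
--     if not (repo0.startswith('https://') or repo0.startswith('http://')):
--         # No protocol specified
--         if repo0.split('/')[0].count('.') > 0: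
--             # First element contains dots so must be a URL
--             # Assume toolshed URL with no leading protocol
--             repo0 = 'https://' + repo0
--             if len(repository) > 1:
--                 # More than one element so assume that
--                 # first element is URL without trailing
--                 # tool definition
--                 # Check it ends with 'view' or 'repo'
--                 if not repo0.split('/')[-1] in ('view','repo'):
--                     # Append 'view' element
--                     repo0 += '/view'
--         else:
--             # No toolshed: assume main Galaxy toolshed
--             repo0 = "https://toolshed.g2.bx.psu.edu/view/" + repo0
--     repository[0] = repo0
--     tool_url = '/'.join(repository)
--     # Decompose the URL into toolshed, owner, repository
--     # and changeset components
--     toolshed = list()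
--     owner = None
--     repository = None
--     revision = None
--     for ix,ele in enumerate(tool_url.split('/')):
--         if ele not in ('view','repo'):
--             toolshed.append(ele)
--         else:
--             toolshed = '/'.join(toolshed)
--             try:
--                 owner = tool_url.split('/')[ix+1]
--                 repository = tool_url.split('/')[ix+2]
--             except IndexError:
--                 # Invalid specification
--                 raise Exception("Invalid repository "
--                                 "specification: '%s'" %
--                                 repo_spec)
--             try:
--                 revision = tool_url.split('/')[ix+3]
--             except IndexError:
--                 revision = None
--             break
--     # Strip off the protocol
--     for protocol in ('http://','https://'):
--         if toolshed.startswith(protocol):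
--             toolshed = toolshed[len(protocol):]
--             break
--     # Handle revision of the form "version:changeset"
--     # e.g. 3:f19e18ab01b1
--     if revision and ':' in revision:
--         revision = revision.split(':')[1]
--     return (toolshed,owner,repository,revision)
-- ===== SOURCE B (Python) =====
-- def handle_repository_spec(repo_spec):
--     repository = list(repo_spec)
--     repo0 = repository[0].strip('/')
--     if not (repo0.startswith('https://') or repo0.startswith('http://')):
--         if repo0.split('/')[0].count('.') > 0:
--             repo0 = 'https://' + repo0
--             if len(repository) > 1:
--                 if not repo0.split('/')[-1] in ('view', 'repo'):
--                     repo0 += '/view'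
--         else:
--             repo0 = "https://toolshed.g2.bx.psu.edu/view/" + repo0
--     repository[0] = repo0
--     segments = '/'.join(repository).split('/')
--
--     def walk(segs):
--         # Recursively consume segments; the toolshed string is assembled
--         # back-to-front while the recursion unwinds (None = marker was head).
--         if not segs:
--             # no 'view'/'repo' marker at all (A raises AttributeError here)
--             raise Exception("Invalid repository specification: '%s'" % repo_spec)
--         head, tail = segs[0], segs[1:]
--         if head in ('view', 'repo'):
--             if len(tail) < 2:
--                 raise Exception("Invalid repository "
--                                 "specification: '%s'" % repo_spec)
--             revision = tail[2] if len(tail) > 2 else None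
--             return None, tail[0], tail[1], revision
--         shed, owner, name, revision = walk(tail)
--         shed = head if shed is None else head + '/' + shed
--         return shed, owner, name, revision
--
--     shed, owner, name, revision = walk(segments)
--     toolshed = '' if shed is None else shed
--     for protocol in ('http://', 'https://'):
--         if toolshed.startswith(protocol):
--             toolshed = toolshed[len(protocol):]
--             break
--     if revision and ':' in revision:
--         revision = revision.split(':')[1]
--     return (toolshed, owner, name, revision)
-- ===== Notes on version B (the rewrite author's own statement) =====
-- stated objective: alternative
-- what changed: A's enumerate loop (accumulating a toolshed list and re-splitting tool_url at every index access, with try/except index probing) is replaced by a recursion that consumes the segment list by pattern matching, reads owner/name/revision from the tail at the first marker, and assembles the toolshed string back-to-front while the recursion unwinds; the normalization preamble is kept identical.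
import Mathlib
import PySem

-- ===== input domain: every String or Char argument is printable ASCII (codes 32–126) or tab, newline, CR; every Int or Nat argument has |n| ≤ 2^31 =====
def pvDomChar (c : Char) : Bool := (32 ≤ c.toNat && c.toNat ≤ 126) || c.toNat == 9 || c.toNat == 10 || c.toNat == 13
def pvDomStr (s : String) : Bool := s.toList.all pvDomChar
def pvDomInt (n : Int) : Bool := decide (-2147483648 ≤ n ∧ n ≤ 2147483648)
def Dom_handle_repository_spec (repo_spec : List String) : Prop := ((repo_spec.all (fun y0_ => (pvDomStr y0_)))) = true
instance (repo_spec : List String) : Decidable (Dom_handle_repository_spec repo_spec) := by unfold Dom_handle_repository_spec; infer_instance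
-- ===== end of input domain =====

-- B replaces A's indexed enumerate loop (which accumulates a toolshed list and re-splits the URL
-- at every index access with try/except probing) by a recursion that consumes the segment list by
-- pattern matching and assembles the toolshed string back-to-front while unwinding; objective: alternative (same cost).

-- s.split('/') ('/' is never empty, so split? always returns a value)
def pvSplitSlash (s : String) : List String := (PySem.Str.split? s "/").getD []

-- ele in ('view','repo')
def pvIsMarker (e : String) : Bool := e == "view" || e == "repo"

-- the shared normalization preamble (identical straight-line code in both Pythons):
-- repo_spec[0] stripped of '/', protocol/toolshed/'view' adjustments applied
def pvRepo0 (repo_spec : List String) : String :=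
  let repo0 := PySem.Str.stripChars (repo_spec.getD 0 "") "/"   -- repo_spec = []: IndexError, excluded by Pre_
  if !(PySem.Str.startswith repo0 "https://" || PySem.Str.startswith repo0 "http://") then
    if PySem.Str.count ((pvSplitSlash repo0).getD 0 "") "." > 0 then
      let repo0 := "https://" ++ repo0
      if repo_spec.length > 1 then
        if !(pvIsMarker (PySem.List.pyGetD (pvSplitSlash repo0) (-1) "")) then repo0 ++ "/view"
        else repo0
      else repo0
    else "https://toolshed.g2.bx.psu.edu/view/" ++ repo0
  else repo0

-- ===== PORT A =====
-- A's 'for ix,ele in enumerate(tool_url.split('/')): …' loop: accumulates toolshed elements,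
-- breaks at the first 'view'/'repo' marker, re-splitting tool_url at every index access as the
-- Python does; 'none' = the loop ended without break (Python then raises AttributeError, or the
-- try/except raised the custom Exception on a missing owner/repository) — excluded by Pre_.
def pvLoopA (tool_url : String) : List String → Nat → List String → Option (String × String × String × Option String)
  | [], _, _ => none
  | ele :: rest, ix, toolshed =>
    if !(pvIsMarker ele) then
      pvLoopA tool_url rest (ix + 1) (toolshed ++ [ele])
    else
      if _h1 : ix + 1 < (pvSplitSlash tool_url).length then
        if _h2 : ix + 2 < (pvSplitSlash tool_url).length then
          some (PySem.Str.join "/" toolshed,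
                (pvSplitSlash tool_url).getD (ix + 1) "",
                (pvSplitSlash tool_url).getD (ix + 2) "",
                (pvSplitSlash tool_url)[ix + 3]?)     -- try/except IndexError: None when out of range
        else none      -- 'repository = …[ix+2]' raised IndexError → custom Exception (excluded by Pre_)
      else none        -- 'owner = …[ix+1]' raised IndexError → custom Exception (excluded by Pre_)

def handle_repository_spec (repo_spec : List String) : String × String × String × Option String :=
  let repo0 := pvRepo0 repo_spec
  let tool_url := PySem.Str.join "/" (repo0 :: repo_spec.tail)
  match pvLoopA tool_url (pvSplitSlash tool_url) 0 [] with
  | none => ("", "", "", none)   -- Python raises here; excluded by Pre_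
  | some (toolshed, owner, repository, revision) =>
    let toolshed :=
      if PySem.Str.startswith toolshed "http://" then PySem.Str.slice toolshed (some 7) none
      else if PySem.Str.startswith toolshed "https://" then PySem.Str.slice toolshed (some 8) none
      else toolshed
    let revision :=
      match revision with
      | some r => if r ≠ "" && PySem.Str.isIn ":" r then some (((PySem.Str.split? r ":").getD []).getD 1 "") else some r
      | none => none
    (toolshed, owner, repository, revision)

-- ===== PORT B =====
-- B's recursive 'walk': consume the segment list by pattern matching; at the first marker read
-- owner/name/revision from the tail; build the toolshed string back-to-front while unwinding
-- ('none' in the first component = the marker was the head, i.e. empty toolshed prefix).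
-- The outer 'none' = walk raised (no marker at all, or fewer than two segments after it).
def pvWalkB : List String → Option (Option String × String × String × Option String)
  | [] => none            -- 'raise Exception(…)': no marker (excluded by Pre_)
  | head :: tail =>
    if pvIsMarker head then
      if tail.length < 2 then none   -- 'raise Exception("Invalid repository specification: …")'
      else
        let revision := if tail.length > 2 then some (tail.getD 2 "") else none
        some (none, tail.getD 0 "", tail.getD 1 "", revision)
    else
      match pvWalkB tail with
      | none => none
      | some (shed, owner, name, revision) =>
        let shed := match shed with
          | none => some head
          | some s => some (head ++ "/" ++ s)
        some (shed, owner, name, revision)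

def handle_repository_spec_alt (repo_spec : List String) : String × String × String × Option String :=
  let repo0 := pvRepo0 repo_spec
  let segments := pvSplitSlash (PySem.Str.join "/" (repo0 :: repo_spec.tail))
  match pvWalkB segments with
  | none => ("", "", "", none)   -- walk raised; excluded by Pre_
  | some (shed, owner, name, revision) =>
    let toolshed := match shed with | none => "" | some s => s
    let toolshed :=
      if PySem.Str.startswith toolshed "http://" then PySem.Str.slice toolshed (some 7) none
      else if PySem.Str.startswith toolshed "https://" then PySem.Str.slice toolshed (some 8) none
      else toolshed
    let revision :=
      match revision with
      | some r => if r ≠ "" && PySem.Str.isIn ":" r then some (((PySem.Str.split? r ":").getD []).getD 1 "") else some r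
      | none => none
    (toolshed, owner, name, revision)

-- ===== PRECONDITION & SPEC =====
-- the normalized URL components both Pythons decompose (the straight-line preamble, no loop)
def pvParts (repo_spec : List String) : List String :=
  pvSplitSlash (PySem.Str.join "/" (pvRepo0 repo_spec :: repo_spec.tail))

-- Pre_ excludes exactly the inputs on which A raises: the empty list (IndexError), specs whose
-- normalized URL has no 'view'/'repo' component (AttributeError on the list 'toolshed'), and specs
-- with fewer than two components after the first marker (the explicit 'Invalid repository
-- specification' Exception).  A returns normally on every other input.
def Pre_handle_repository_spec (repo_spec : List String) : Prop :=
  repo_spec ≠ [] ∧ (pvParts repo_spec).findIdx pvIsMarker + 2 < (pvParts repo_spec).length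
instance (repo_spec : List String) : Decidable (Pre_handle_repository_spec repo_spec) := by
  unfold Pre_handle_repository_spec; infer_instance

def pvWitness_handle_repository_spec : List String := ["devteam/fastqc"]

def Spec_handle_repository_spec (repo_spec : List String) (out : String × String × String × Option String) : Prop := out = handle_repository_spec_alt repo_spec
instance (repo_spec : List String) (out : String × String × String × Option String) : Decidable (Spec_handle_repository_spec repo_spec out) := by unfold Spec_handle_repository_spec; infer_instance

-- ===== CLAIM (what is proved, stated in full; the proofs are below) =====
def Claim_equal_handle_repository_spec : Prop := ∀ (repo_spec : List String), Dom_handle_repository_spec repo_spec → Pre_handle_repository_spec repo_spec → Spec_handle_repository_spec repo_spec (handle_repository_spec repo_spec)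

-- ===== LEMMAS AND PROOFS =====

-- A's loop, started anywhere: characterised by the first-marker index of the remaining elements.
lemma pvLoopA_spec (tool_url : String) :
    ∀ (rest : List String) (ix : Nat) (acc : List String),
      pvLoopA tool_url rest ix acc =
        if rest.findIdx pvIsMarker < rest.length then
          (if _h1 : ix + rest.findIdx pvIsMarker + 1 < (pvSplitSlash tool_url).length then
            if _h2 : ix + rest.findIdx pvIsMarker + 2 < (pvSplitSlash tool_url).length then
              some (PySem.Str.join "/" (acc ++ rest.take (rest.findIdx pvIsMarker)),
                    (pvSplitSlash tool_url).getD (ix + rest.findIdx pvIsMarker + 1) "",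
                    (pvSplitSlash tool_url).getD (ix + rest.findIdx pvIsMarker + 2) "",
                    (pvSplitSlash tool_url)[ix + rest.findIdx pvIsMarker + 3]?)
            else none
          else none)
        else none := by
  intro rest
  induction rest with
  | nil => intro ix acc; simp [pvLoopA]
  | cons ele rest ih =>
    intro ix acc
    by_cases hm : pvIsMarker ele
    · simp [pvLoopA, hm, List.findIdx_cons]
    · have hf : (ele :: rest).findIdx pvIsMarker = rest.findIdx pvIsMarker + 1 := by
        simp [List.findIdx_cons, hm]
      rw [pvLoopA, if_pos (by simp [hm]), ih (ix + 1) (acc ++ [ele]), hf]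
      have harith1 : ix + 1 + rest.findIdx pvIsMarker = ix + (rest.findIdx pvIsMarker + 1) := by omega
      simp only [List.length_cons, harith1, List.take_succ_cons, List.append_assoc,
        List.singleton_append]
      simp only [Nat.add_lt_add_iff_right]

-- B's recursion: characterised by the first-marker index i of the segment list; the back-to-front
-- toolshed equals the join of the first i segments ('none' exactly when i = 0).
lemma pvWalkB_spec :
    ∀ (segs : List String),
      segs.findIdx pvIsMarker + 2 < segs.length →
      pvWalkB segs =
        some (if segs.findIdx pvIsMarker = 0 then none
                else some (PySem.Str.join "/" (segs.take (segs.findIdx pvIsMarker))),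
              segs.getD (segs.findIdx pvIsMarker + 1) "",
              segs.getD (segs.findIdx pvIsMarker + 2) "",
              segs[segs.findIdx pvIsMarker + 3]?) := by
  intro segs
  induction segs with
  | nil => intro h; simp at h
  | cons head tail ih =>
    intro h
    by_cases hm : pvIsMarker head
    · have hf : (head :: tail).findIdx pvIsMarker = 0 := by simp [List.findIdx_cons, hm]
      rw [hf] at h ⊢
      simp only [List.length_cons] at h
      rw [pvWalkB, if_pos hm, if_neg (show ¬ tail.length < 2 by omega)]
      simp only [Nat.zero_add, List.getD_cons_succ, List.getElem?_cons_succ]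
      by_cases h3 : 2 < tail.length
      · rw [if_pos h3, List.getElem?_eq_getElem h3, List.getD_eq_getElem _ _ h3]; simp
      · rw [if_neg h3, List.getElem?_eq_none (by omega)]; simp
    · have hf : (head :: tail).findIdx pvIsMarker = tail.findIdx pvIsMarker + 1 := by
        simp [List.findIdx_cons, hm]
      rw [hf] at h ⊢
      simp only [List.length_cons] at h
      have htail := ih (by omega)
      rw [pvWalkB, if_neg (by simp [hm]), htail]
      rw [show tail.findIdx pvIsMarker + 1 + 1 = (tail.findIdx pvIsMarker + 1) + 1 from rfl,
          show tail.findIdx pvIsMarker + 1 + 2 = (tail.findIdx pvIsMarker + 2) + 1 from by omega,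
          show tail.findIdx pvIsMarker + 1 + 3 = (tail.findIdx pvIsMarker + 3) + 1 from by omega]
      simp only [List.getD_cons_succ, List.getElem?_cons_succ,
        if_neg (Nat.succ_ne_zero (tail.findIdx pvIsMarker)), List.take_succ_cons]
      by_cases hi : tail.findIdx pvIsMarker = 0
      · rw [hi]
        simp only [List.take_zero]
        have hjoin : PySem.Str.join "/" [head] = head := by
          apply String.toList_inj.mp
          rw [PySem.Str.toList_join]
          simp [PySem.Chars.join_singleton]
        simp [hjoin]
      · rw [if_neg hi]
        have htake : tail.take (tail.findIdx pvIsMarker) ≠ [] := by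
          intro hc
          rcases List.take_eq_nil_iff.mp hc with h0 | h0
          · exact hi h0
          · subst h0; simp at h
        -- join "/" (head :: take) = head ++ "/" ++ join "/" take  when take ≠ []
        have hjoin : PySem.Str.join "/" (head :: tail.take (tail.findIdx pvIsMarker)) =
            head ++ "/" ++ PySem.Str.join "/" (tail.take (tail.findIdx pvIsMarker)) := by
          apply String.toList_inj.mp
          obtain ⟨z, t, hzt⟩ := List.exists_cons_of_ne_nil htake
          rw [hzt]
          simp only [PySem.Str.toList_join, List.map_cons, String.toList_append]
          rw [PySem.Chars.join_cons_cons]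
        simp [hjoin]

-- ===== VERDICT =====
theorem handle_repository_spec_spec : Claim_equal_handle_repository_spec := by
  intro repo_spec _ hpre
  obtain ⟨hne, hlt⟩ := hpre
  unfold pvParts at hlt
  unfold Spec_handle_repository_spec handle_repository_spec handle_repository_spec_alt
  dsimp only at hlt ⊢
  set P := pvSplitSlash (PySem.Str.join "/" (pvRepo0 repo_spec :: repo_spec.tail)) with hP
  rw [pvLoopA_spec, pvWalkB_spec _ hlt]
  rw [← hP]
  rw [if_pos (by omega), dif_pos (by omega), dif_pos (by omega)]
  simp only [Nat.zero_add, List.nil_append]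
  by_cases hi : P.findIdx pvIsMarker = 0
  · rw [hi]
    simp only [List.take_zero]
    have hempty : PySem.Str.join "/" ([] : List String) = "" := by
      apply String.toList_inj.mp
      simp [PySem.Str.toList_join, PySem.Chars.join_nil]
    simp [hempty]
  · rw [if_neg hi]
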